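-- pv_equiv track=rewrite | github.com/CVizard-com/textcleaner | text_cleaner/cleaner.py | delete_entities
-- ===== SOURCE A (Python) =====
-- def find_all_occurrences_with_indexes(text: str, word: str) -> list[tuple[int, int]]:
--     occurrences = []
--     index = -1
--
--     while True:
--         index = text.find(word, index + 1)
--         if index == -1:
--             break
--         occurrences.append((index, index + len(word) - 1))
--
--     return occurrences
--
-- def delete_entities(text: str, entities: dict[list]) -> str:
--     words_to_delete = []
--     for word_list in entities.values():
--         words_to_delete.extend(word_list)
--
--     words_to_delete = list(set(words_to_delete))
--
--     delete_ranges = []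
--     for word in words_to_delete:
--         delete_ranges.extend(find_all_occurrences_with_indexes(text.lower(), word.lower()))
--
--     delete_ranges = sorted(delete_ranges, key=lambda x: x[0])
--
--     if not delete_ranges:
--         return text
--
--     new_text = ''
--     for letter_index, letter in enumerate(text):
--         if not any(start <= letter_index <= end for start, end in delete_ranges):
--             new_text += letter
--
--     return new_text
-- ===== SOURCE B (Python) =====
-- def delete_entities(text: str, entities: dict) -> str:
--     words = set()
--     for word_list in entities.values():
--         for w in word_list:
--             words.add(w)
--
--     lowered = text.lower()
--     covered = [False] * len(lowered)
--     for word in words: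
--         w = word.lower()
--         start = lowered.find(w)
--         while start != -1:
--             for i in range(start, start + len(w)):
--                 covered[i] = True
--             start = lowered.find(w, start + 1)
--
--     return ''.join(ch for i, ch in enumerate(text) if not covered[i])
-- ===== Notes on version B (the rewrite author's own statement) =====
-- stated objective: faster
-- what changed: Instead of collecting all match ranges and testing every character against every range, B marks covered positions in a boolean array while scanning for matches and then keeps the unmarked characters in one pass.
import Mathlib
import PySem

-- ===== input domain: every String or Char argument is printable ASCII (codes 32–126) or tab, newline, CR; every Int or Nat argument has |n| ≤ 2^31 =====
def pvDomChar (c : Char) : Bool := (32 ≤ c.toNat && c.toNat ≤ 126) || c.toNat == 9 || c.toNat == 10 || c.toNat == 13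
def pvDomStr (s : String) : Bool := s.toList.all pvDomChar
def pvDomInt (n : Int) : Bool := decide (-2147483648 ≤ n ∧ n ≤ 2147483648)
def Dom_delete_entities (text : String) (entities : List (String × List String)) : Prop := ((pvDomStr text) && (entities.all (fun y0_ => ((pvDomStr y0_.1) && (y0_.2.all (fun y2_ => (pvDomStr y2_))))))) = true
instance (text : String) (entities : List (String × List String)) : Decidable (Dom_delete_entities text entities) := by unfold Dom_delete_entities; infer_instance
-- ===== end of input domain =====

-- B replaces A's per-character scan over all match ranges by a boolean cover array filled while
-- matching and one final pass keeping uncovered characters (objective: faster).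


-- ===== PORT A =====
-- the 'while True: index = text.find(word, index+1) …' loop of A's helper; the fuel
-- (text.length + 2) only makes the loop total: each iteration restarts the search past the
-- previous hit, so at most text.length + 2 iterations can find something.
def pvOccGo (text word : List Char) : Nat → Int → List (Int × Int)
  | 0, _ => []
  | fuel + 1, start =>
    let index := PySem.Chars.findFrom text word start none
    if index = -1 then []
    else (index, index + word.length - 1) :: pvOccGo text word fuel (index + 1)

def find_all_occurrences_with_indexes (text word : List Char) : List (Int × Int) :=
  pvOccGo text word (text.length + 2) 0

def delete_entities (text : String) (entities : List (String × List String)) : String :=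
  let words0 := entities.foldl (fun acc p => acc ++ p.2) ([] : List String)
  let words := PySem.Set.ofList words0
  let ranges0 := words.foldl (fun acc w =>
      acc ++ find_all_occurrences_with_indexes (PySem.Chars.lower text.toList)
        (PySem.Chars.lower w.toList)) []
  let ranges := PySem.List.sorted ranges0 (fun x => x.1)
  if ranges = [] then text
  else String.ofList ((PySem.List.enumerate text.toList 0).foldl
    (fun acc p =>
      if !(ranges.any fun r => decide (r.1 ≤ p.1) && decide (p.1 ≤ r.2)) then acc ++ [p.2]
      else acc) [])

-- ===== PORT B =====
-- 'for i in range(s, s+l): covered[i] = True'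
def pvMarkRange : List Bool → Nat → Nat → List Bool
  | cov, _, 0 => cov
  | cov, s, l + 1 => pvMarkRange (PySem.List.pySetD cov (s : Int) true) (s + 1) l

-- B's 'start = lowered.find(w); while start != -1: mark; start = lowered.find(w, start+1)';
-- fuel as in pvOccGo, only to make the loop total.
def pvMarkGo (text word : List Char) : Nat → Int → List Bool → List Bool
  | 0, _, cov => cov
  | fuel + 1, start, cov =>
    let index := PySem.Chars.findFrom text word start none
    if index = -1 then cov
    else pvMarkGo text word fuel (index + 1) (pvMarkRange cov index.toNat word.length)

def delete_entities_alt (text : String) (entities : List (String × List String)) : String :=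
  let words := entities.foldl (fun s p => p.2.foldl PySem.Set.add s) (PySem.Set.empty)
  let lowered := PySem.Chars.lower text.toList
  let covered := words.foldl
      (fun cov w => pvMarkGo lowered (PySem.Chars.lower w.toList) (lowered.length + 2) 0 cov)
      (List.replicate lowered.length false)
  String.ofList (((PySem.List.enumerate text.toList 0).filter
      (fun p => !(PySem.List.pyGetD covered p.1 false))).map (·.2))

-- ===== PRECONDITION & SPEC =====
def Spec_delete_entities (text : String) (entities : List (String × List String)) (out : String) : Prop := out = delete_entities_alt text entities
instance (text : String) (entities : List (String × List String)) (out : String) : Decidable (Spec_delete_entities text entities out) := by unfold Spec_delete_entities; infer_instance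

-- ===== CLAIM (what is proved, stated in full; the proofs are below) =====
def Claim_equal_delete_entities : Prop := ∀ (text : String) (entities : List (String × List String)), Dom_delete_entities text entities → Spec_delete_entities text entities (delete_entities text entities)


-- ===== LEMMAS AND PROOFS =====

-- pooling the entity word lists via set.add per element equals list(set(concatenation))
theorem pv_words_aux (entities : List (String × List String)) (s : PySem.Set String) :
    entities.foldl (fun s p => p.2.foldl PySem.Set.add s) s
      = (entities.flatMap (fun p => p.2)).foldl PySem.Set.add s := by
  induction entities generalizing s with
  | nil => rfl
  | cons p rest ih => simp only [List.foldl_cons, List.flatMap_cons, List.foldl_append, ih]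

theorem pv_words_eq (entities : List (String × List String)) :
    entities.foldl (fun s p => p.2.foldl PySem.Set.add s) PySem.Set.empty
      = PySem.Set.ofList (entities.flatMap (fun p => p.2)) := by
  rw [pv_words_aux]; rfl

theorem pv_if_nonneg (n st r : Int) (hst : 0 ≤ st) (hr : -1 ≤ r)
    (h : (if n < st then (-1 : Int) else if r = -1 then -1 else st + r) ≠ -1) :
    0 ≤ (if n < st then (-1 : Int) else if r = -1 then -1 else st + r) := by
  split_ifs at h ⊢ <;> omega

theorem pv_findFrom_nonneg (s sub : List Char) (start : Int)
    (h : PySem.Chars.findFrom s sub start none ≠ -1) :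
    0 ≤ PySem.Chars.findFrom s sub start none := by
  simp only [PySem.Chars.findFrom] at h ⊢
  exact pv_if_nonneg _ _ _ (by split_ifs <;> omega) (PySem.Chars.neg_one_le_find _ _) h

theorem pv_len_pySetD (cov : List Bool) (i : Int) (v : Bool) :
    (PySem.List.pySetD cov i v).length = cov.length := by
  simp only [PySem.List.pySetD, PySem.List.pySet?, PySem.List.pyIdx?]
  split_ifs <;> simp

theorem pv_getD_pySetD (cov : List Bool) (s j : Nat) (hj : j < cov.length) :
    (PySem.List.pySetD cov (s : Int) true).getD j false
      = (cov.getD j false || decide (j = s)) := by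
  simp only [PySem.List.pySetD, PySem.List.pySet?, PySem.List.pyIdx?]
  by_cases hs : s < cov.length
  · have : ((s : Int) < (cov.length : Int)) := by exact_mod_cast hs
    simp only [Int.natCast_nonneg, if_pos this, Int.toNat_natCast]
    by_cases hjs : j = s
    · subst hjs
      simp [List.getD, hj]
    · simp [List.getD, Ne.symm hjs, hjs]
  · have h1 : ¬ ((s : Int) < (cov.length : Int)) := by exact_mod_cast hs
    have h2 : j ≠ s := by omega
    simp [h1, h2]

theorem pv_len_markRange (cov : List Bool) (s l : Nat) :
    (pvMarkRange cov s l).length = cov.length := by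
  induction l generalizing cov s with
  | zero => rfl
  | succ l ih => rw [pvMarkRange, ih, pv_len_pySetD]

theorem pv_getD_markRange (l : Nat) (cov : List Bool) (s j : Nat) (hj : j < cov.length) :
    (pvMarkRange cov s l).getD j false
      = (cov.getD j false || decide (s ≤ j ∧ j < s + l)) := by
  induction l generalizing cov s with
  | zero =>
    simp only [pvMarkRange]
    rw [decide_eq_false (by omega : ¬ (s ≤ j ∧ j < s + 0)), Bool.or_false]
  | succ l ih =>
    rw [pvMarkRange, ih _ _ (by rw [pv_len_pySetD]; exact hj),
      pv_getD_pySetD _ _ _ hj, Bool.or_assoc, ← Bool.decide_or]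
    congr 1
    rw [decide_eq_decide]
    omega

theorem pv_len_markGo (t w : List Char) (fuel : Nat) (start : Int) (cov : List Bool) :
    (pvMarkGo t w fuel start cov).length = cov.length := by
  induction fuel generalizing start cov with
  | zero => rfl
  | succ fuel ih =>
    simp only [pvMarkGo]
    split_ifs
    · rfl
    · rw [ih, pv_len_markRange]

theorem pv_getD_markGo (t w : List Char) (fuel : Nat) (start : Int) (cov : List Bool)
    (j : Nat) (hj : j < cov.length) :
    (pvMarkGo t w fuel start cov).getD j false
      = (cov.getD j false
         || (pvOccGo t w fuel start).any
              (fun r => decide (r.1 ≤ (j : Int)) && decide ((j : Int) ≤ r.2))) := by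
  induction fuel generalizing start cov with
  | zero => simp [pvMarkGo, pvOccGo]
  | succ fuel ih =>
    simp only [pvMarkGo, pvOccGo]
    by_cases hf : PySem.Chars.findFrom t w start none = -1
    · simp [hf]
    · have h0 : 0 ≤ PySem.Chars.findFrom t w start none := pv_findFrom_nonneg t w start hf
      rw [if_neg hf, if_neg hf,
        ih _ _ (by rw [pv_len_markRange]; exact hj),
        pv_getD_markRange _ _ _ _ hj, List.any_cons, Bool.or_assoc]
      congr 2
      rw [← Bool.decide_and, decide_eq_decide]
      constructor
      · rintro ⟨h1, h2⟩
        constructor <;> [skip; skip] <;> omega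
      · rintro ⟨h1, h2⟩
        constructor <;> omega

theorem pv_getD_foldWords (t : List Char) (words : List String) (cov : List Bool)
    (j : Nat) (hj : j < cov.length) :
    ((words.foldl (fun cov w => pvMarkGo t (PySem.Chars.lower w.toList) (t.length + 2) 0 cov)
        cov).getD j false)
      = (cov.getD j false
         || words.any (fun w => (find_all_occurrences_with_indexes t (PySem.Chars.lower w.toList)).any
              (fun r => decide (r.1 ≤ (j : Int)) && decide ((j : Int) ≤ r.2)))) := by
  induction words generalizing cov with
  | nil => simp
  | cons w rest ih =>
    rw [List.foldl_cons, ih _ (by rw [pv_len_markGo]; exact hj),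
      pv_getD_markGo _ _ _ _ _ _ hj, List.any_cons, Bool.or_assoc]
    rfl

-- ===== VERDICT (by name: the statement is the Claim_ definition above) =====
theorem delete_entities_spec : Claim_equal_delete_entities := by
  intro text entities _
  simp only [Spec_delete_entities, delete_entities, delete_entities_alt, pv_words_eq,
    PySem.List.foldl_append_eq_flatMap, List.nil_append]
  have hlent : (PySem.Chars.lower text.toList).length = text.toList.length := by
    simp [PySem.Chars.lower]
  have hcov : ∀ (k : Nat), k < text.toList.length →
      ((PySem.Set.ofList (entities.flatMap fun p => p.2)).foldl
        (fun cov w => pvMarkGo (PySem.Chars.lower text.toList) (PySem.Chars.lower w.toList)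
          ((PySem.Chars.lower text.toList).length + 2) 0 cov)
        (List.replicate (PySem.Chars.lower text.toList).length false)).getD k false
      = ((PySem.Set.ofList (entities.flatMap fun p => p.2)).flatMap
          (fun w => find_all_occurrences_with_indexes (PySem.Chars.lower text.toList)
            (PySem.Chars.lower w.toList))).any
          (fun r => decide (r.1 ≤ (k : Int)) && decide ((k : Int) ≤ r.2)) := by
    intro k hk
    rw [pv_getD_foldWords _ _ _ k (by rw [List.length_replicate, hlent]; exact hk),
      List.getD_replicate _ (by rw [hlent]; exact hk), List.any_flatMap]
    simp
  have hperm := PySem.List.sorted_perm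
    ((PySem.Set.ofList (entities.flatMap fun p => p.2)).flatMap
      (fun w => find_all_occurrences_with_indexes (PySem.Chars.lower text.toList)
        (PySem.Chars.lower w.toList))) (fun x => x.1) false
  by_cases hr : PySem.List.sorted
      ((PySem.Set.ofList (entities.flatMap fun p => p.2)).flatMap
        (fun w => find_all_occurrences_with_indexes (PySem.Chars.lower text.toList)
          (PySem.Chars.lower w.toList))) (fun x => x.1) = []
  · rw [if_pos hr]
    have h0 : ((PySem.Set.ofList (entities.flatMap fun p => p.2)).flatMap
        (fun w => find_all_occurrences_with_indexes (PySem.Chars.lower text.toList)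
          (PySem.Chars.lower w.toList))) = [] := by
      rw [hr] at hperm
      exact (List.Perm.nil_eq hperm).symm
    have hall : ∀ p ∈ PySem.List.enumerate text.toList 0,
        (!(PySem.List.pyGetD ((PySem.Set.ofList (entities.flatMap fun p => p.2)).foldl
          (fun cov w => pvMarkGo (PySem.Chars.lower text.toList) (PySem.Chars.lower w.toList)
            ((PySem.Chars.lower text.toList).length + 2) 0 cov)
          (List.replicate (PySem.Chars.lower text.toList).length false)) p.1 false)) = true := by
      intro p hp
      rcases (PySem.List.mem_enumerate_iff _ _ _).1 hp with ⟨k, hk, rfl⟩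
      simp only [zero_add, PySem.List.pyGetD_natCast, hcov k hk, h0]
      simp
    rw [List.filter_eq_self.2 hall, PySem.List.map_snd_enumerate, String.ofList_toList]
  · rw [if_neg hr, PySem.List.foldl_append_if, List.nil_append]
    refine congrArg String.ofList ?_
    show List.map (fun x : Int × Char => x.2) _ = List.map (fun x : Int × Char => x.2) _
    refine congrArg _ (List.filter_congr ?_)
    intro p hp
    rcases (PySem.List.mem_enumerate_iff _ _ _).1 hp with ⟨k, hk, rfl⟩
    simp only [zero_add, PySem.List.pyGetD_natCast, hcov k hk, hperm.any_eq]
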